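-- pv_equiv track=rewrite | github.com/aast242/salamander-timetree | rep_seqs.py | make_gene_dict
-- ===== SOURCE A (Python) =====
-- ORDER_DICT = {"species": 0, "accession": 1, "range": 2, "gene": 3, "date": 4, "length": 5}
--
-- def make_gene_dict(spp_list, gene_names, gois):
--     final_dict = {i: {j: [] for j in gene_names} for i in spp_list}
--     for entry in gois:
--         try:
--             final_dict[entry[ORDER_DICT["species"]]][entry[ORDER_DICT["gene"]]].append(entry)
--         except KeyError:
--             pass
--     return final_dict
-- ===== SOURCE B (Python) =====
-- def make_gene_dict(spp_list, gene_names, gois):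
--     return {
--         s: {g: [e for e in gois if e[0] == s and e[3] == g] for g in gene_names}
--         for s in spp_list
--     }
-- ===== Notes on version B (the rewrite author's own statement) =====
-- stated objective: simpler
-- what changed: Replaces A's skeleton-then-mutate grouping pass (with a try/except KeyError) by a single nested dict comprehension that builds each (species, gene) bucket directly by filtering gois.
import Mathlib
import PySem

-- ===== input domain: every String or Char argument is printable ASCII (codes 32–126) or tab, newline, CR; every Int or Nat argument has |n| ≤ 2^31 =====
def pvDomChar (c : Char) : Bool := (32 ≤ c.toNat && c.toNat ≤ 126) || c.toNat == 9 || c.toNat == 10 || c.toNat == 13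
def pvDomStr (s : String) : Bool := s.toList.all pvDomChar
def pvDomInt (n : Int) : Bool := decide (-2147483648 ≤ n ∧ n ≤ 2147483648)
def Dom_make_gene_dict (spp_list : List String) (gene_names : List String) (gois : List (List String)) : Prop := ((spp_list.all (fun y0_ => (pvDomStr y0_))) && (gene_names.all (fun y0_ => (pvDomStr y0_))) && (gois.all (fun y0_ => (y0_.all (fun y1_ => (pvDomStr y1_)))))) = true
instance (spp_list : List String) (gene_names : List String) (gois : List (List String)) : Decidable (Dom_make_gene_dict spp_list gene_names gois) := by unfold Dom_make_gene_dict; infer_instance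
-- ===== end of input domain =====

-- B replaces A's skeleton-then-mutate pass (try/except KeyError) with a nested dict
-- comprehension that fills each (species, gene) bucket by filtering gois; simpler, not faster.
-- Equivalence is about return values; neither version mutates its arguments.

-- ===== PORT A =====
def ORDER_DICT : PySem.Dict String Int :=
  PySem.Dict.ofList [("species", 0), ("accession", 1), ("range", 2), ("gene", 3), ("date", 4), ("length", 5)]

-- one iteration of A's `for entry in gois` loop; `none` branches are the caught KeyErrors (pass)
def mgdStep (d : PySem.Dict String (PySem.Dict String (List (List String)))) (entry : List String) :
    PySem.Dict String (PySem.Dict String (List (List String))) :=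
  match d.get? (PySem.List.pyGetD entry (ORDER_DICT.getD "species" 0) "") with
  | none => d
  | some inner =>
    match inner.get? (PySem.List.pyGetD entry (ORDER_DICT.getD "gene" 0) "") with
    | none => d
    | some lst =>
        d.insert (PySem.List.pyGetD entry (ORDER_DICT.getD "species" 0) "")
          (inner.insert (PySem.List.pyGetD entry (ORDER_DICT.getD "gene" 0) "") (lst ++ [entry]))

def make_gene_dict (spp_list : List String) (gene_names : List String) (gois : List (List String)) :
    List (String × List (String × List (List String))) :=
  let final_dict :=
    spp_list.foldl
      (fun d i => d.insert i (gene_names.foldl (fun d2 j => d2.insert j ([] : List (List String))) PySem.Dict.empty))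
      PySem.Dict.empty
  ((gois.foldl mgdStep final_dict).items).map (fun p => (p.1, p.2.items))

-- ===== PORT B =====
-- the comprehension filter `e[0] == s and e[3] == g`
def bPred (s g : String) (e : List String) : Bool :=
  (PySem.List.pyGetD e 0 "" == s) && (PySem.List.pyGetD e 3 "" == g)

def make_gene_dict_alt (spp_list : List String) (gene_names : List String) (gois : List (List String)) :
    List (String × List (String × List (List String))) :=
  ((spp_list.foldl
      (fun d s => d.insert s (gene_names.foldl (fun d2 g => d2.insert g (gois.filter (bPred s g))) PySem.Dict.empty))
      PySem.Dict.empty).items).map (fun p => (p.1, p.2.items))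

-- ===== PRECONDITION & SPEC =====
-- Pre_ excludes exactly the inputs on which Python A raises IndexError: an empty entry
-- (entry[0] fails), or an entry whose species is in spp_list but which is too short for entry[3].
def Pre_make_gene_dict (spp_list : List String) (gene_names : List String) (gois : List (List String)) : Prop :=
  ∀ e ∈ gois, e ≠ [] ∧ (e.getD 0 "" ∈ spp_list → 4 ≤ e.length)
instance (spp_list : List String) (gene_names : List String) (gois : List (List String)) : Decidable (Pre_make_gene_dict spp_list gene_names gois) := by unfold Pre_make_gene_dict; infer_instance

def pvWitness_make_gene_dict : List String × List String × List (List String) :=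
  (["x", "y"], ["g", "h"], [["x", "a1", "1-2", "g"], ["z", "a2", "1-2"], ["x", "a3", "1-2", "h"]])

def Spec_make_gene_dict (spp_list : List String) (gene_names : List String) (gois : List (List String)) (out : List (String × List (String × List (List String)))) : Prop := out = make_gene_dict_alt spp_list gene_names gois
instance (spp_list : List String) (gene_names : List String) (gois : List (List String)) (out : List (String × List (String × List (List String)))) : Decidable (Spec_make_gene_dict spp_list gene_names gois out) := by unfold Spec_make_gene_dict; infer_instance

-- ===== CLAIM (what is proved, stated in full; the proofs are below) =====
def Claim_equal_make_gene_dict : Prop := ∀ (spp_list : List String) (gene_names : List String) (gois : List (List String)), Dom_make_gene_dict spp_list gene_names gois → Pre_make_gene_dict spp_list gene_names gois → Spec_make_gene_dict spp_list gene_names gois (make_gene_dict spp_list gene_names gois)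

-- ===== LEMMAS AND PROOFS =====

theorem mk_items {κ ν : Type} (d : PySem.Dict κ ν) : PySem.Dict.mk d.items = d := by
  cases d; rfl

-- A's two ORDER_DICT lookups are the constant indices 0 and 3
theorem mgdStep_eq (d : PySem.Dict String (PySem.Dict String (List (List String)))) (e : List String) :
    mgdStep d e =
      match d.get? (PySem.List.pyGetD e 0 "") with
      | none => d
      | some inner =>
        match inner.get? (PySem.List.pyGetD e 3 "") with
        | none => d
        | some lst =>
            d.insert (PySem.List.pyGetD e 0 "")
              (inner.insert (PySem.List.pyGetD e 3 "") (lst ++ [e])) := by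
  have h0 : ORDER_DICT.getD "species" 0 = 0 := by decide
  have h3 : ORDER_DICT.getD "gene" 0 = 3 := by decide
  simp only [mgdStep, h0, h3]

-- a fold of inserts whose value depends only on the key, mapped itemwise through G
theorem items_foldl_insert_map {ν ν' : Type} (G : String → ν') :
    ∀ (l : List String) (F : String → ν) (d : PySem.Dict String ν) (d' : PySem.Dict String ν'),
      d'.items = d.items.map (fun p => (p.1, G p.1)) →
      (l.foldl (fun acc s => acc.insert s (G s)) d').items
        = (l.foldl (fun acc s => acc.insert s (F s)) d).items.map (fun p => (p.1, G p.1)) := by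
  intro l
  induction l with
  | nil => intro F d d' h; simpa using h
  | cons s l ih =>
    intro F d d' h
    simp only [List.foldl_cons]
    apply ih F
    have hk : d'.keys = d.keys := by
      simp only [PySem.Dict.keys, h, List.map_map]
      exact List.map_congr_left (fun p _ => rfl)
    have hc : d'.contains s = d.contains s := by
      rw [PySem.Dict.contains_eq_decide_mem_keys, PySem.Dict.contains_eq_decide_mem_keys, hk]
    cases hcd : d.contains s with
    | false =>
      rw [PySem.Dict.items_insert_of_not_contains _ _ (hc.trans hcd),
          PySem.Dict.items_insert_of_not_contains _ _ hcd]
      simp [h]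
    | true =>
      rw [PySem.Dict.items_insert_of_contains _ _ (hc.trans hcd),
          PySem.Dict.items_insert_of_contains _ _ hcd, h, List.map_map, List.map_map]
      apply List.map_congr_left
      intro p _
      by_cases hp : p.1 = s <;> simp [hp]

-- every value in a fold of constant-value inserts is an old value or the constant
theorem values_foldl_insert_const {ν : Type} (c : ν) :
    ∀ (l : List String) (d : PySem.Dict String ν) (v : ν),
      v ∈ (l.foldl (fun acc s => acc.insert s c) d).values → v ∈ d.values ∨ v = c := by
  intro l
  induction l with
  | nil => intro d v hv; exact Or.inl hv
  | cons s l ih =>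
    intro d v hv
    rcases ih _ _ hv with h | h
    · rcases PySem.Dict.mem_values_insert d s c v h with h' | h'
      · exact Or.inr h'
      · exact Or.inl h'
    · exact Or.inr h

-- the bucket extension that one pass of A over `l` performs, expressed per item
def bucketExt (l : List (List String)) (s : String) (inner : PySem.Dict String (List (List String))) :
    PySem.Dict String (List (List String)) :=
  PySem.Dict.mk (inner.items.map (fun q => (q.1, q.2 ++ l.filter (bPred s q.1))))

def outerExt (l : List (List String)) (D : PySem.Dict String (PySem.Dict String (List (List String)))) :
    PySem.Dict String (PySem.Dict String (List (List String))) :=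
  PySem.Dict.mk (D.items.map (fun p => (p.1, bucketExt l p.1 p.2)))

theorem bucketExt_cons_of_ne (e : List String) (l : List (List String)) (s : String)
    (inner : PySem.Dict String (List (List String))) (h : PySem.List.pyGetD e 0 "" ≠ s) :
    bucketExt (e :: l) s inner = bucketExt l s inner := by
  unfold bucketExt
  congr 1
  apply List.map_congr_left
  intro q _
  have : bPred s q.1 e = false := by simp [bPred, h]
  simp [this]

theorem bucketExt_cons_of_not_key (e : List String) (l : List (List String)) (s : String)
    (inner : PySem.Dict String (List (List String))) (h : PySem.List.pyGetD e 3 "" ∉ inner.keys) :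
    bucketExt (e :: l) s inner = bucketExt l s inner := by
  unfold bucketExt
  congr 1
  apply List.map_congr_left
  intro q hq
  have hne : PySem.List.pyGetD e 3 "" ≠ q.1 := by
    intro hEq; exact h (hEq ▸ PySem.Dict.mem_keys_of_mem_items inner hq)
  have : bPred s q.1 e = false := by simp [bPred]; intro _; exact hne
  simp [this]

-- main invariant: folding A's loop body over l extends every bucket by the matching filter
theorem foldl_mgdStep_eq (l : List (List String)) :
    ∀ (D : PySem.Dict String (PySem.Dict String (List (List String)))),
      D.keys.Nodup → (∀ v ∈ D.values, v.keys.Nodup) →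
      l.foldl mgdStep D = outerExt l D := by
  induction l with
  | nil =>
    intro D _ _
    apply PySem.Dict.ext
    simp [outerExt, bucketExt, mk_items]
  | cons e l ih =>
    intro D hD hV
    simp only [List.foldl_cons]
    rw [mgdStep_eq]
    cases h0 : D.get? (PySem.List.pyGetD e 0 "") with
    | none =>
      have hnk : PySem.List.pyGetD e 0 "" ∉ D.keys := (PySem.Dict.get?_eq_none_iff_not_mem_keys D _).mp h0
      rw [ih D hD hV]
      unfold outerExt
      congr 1
      apply List.map_congr_left
      intro p hp
      have hne : PySem.List.pyGetD e 0 "" ≠ p.1 := by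
        intro hEq; exact hnk (hEq ▸ PySem.Dict.mem_keys_of_mem_items D hp)
      rw [bucketExt_cons_of_ne e l p.1 p.2 hne]
    | some inner =>
      dsimp only
      have hinner_mem : (PySem.List.pyGetD e 0 "", inner) ∈ D.items :=
        PySem.Dict.mem_items_of_get?_eq_some D h0
      have hinner_val : inner ∈ D.values := by
        simp only [PySem.Dict.values]
        exact List.mem_map.mpr ⟨_, hinner_mem, rfl⟩
      have hinner_nodup : inner.keys.Nodup := hV inner hinner_val
      cases h3 : inner.get? (PySem.List.pyGetD e 3 "") with
      | none =>
        dsimp only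
        have hnk3 : PySem.List.pyGetD e 3 "" ∉ inner.keys := (PySem.Dict.get?_eq_none_iff_not_mem_keys inner _).mp h3
        rw [ih D hD hV]
        unfold outerExt
        congr 1
        apply List.map_congr_left
        intro p hp
        by_cases hps : PySem.List.pyGetD e 0 "" = p.1
        · have : p.2 = inner := by
            have := PySem.Dict.get?_of_mem_items D (hps ▸ hp : (PySem.List.pyGetD e 0 "", p.2) ∈ D.items) hD
            rw [h0] at this
            exact (Option.some.injEq _ _ ▸ this).symm
          rw [this, bucketExt_cons_of_not_key e l p.1 inner hnk3]
        · rw [bucketExt_cons_of_ne e l p.1 p.2 hps]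
      | some lst =>
        dsimp only
        have hc0 : D.contains (PySem.List.pyGetD e 0 "") = true := by
          rw [PySem.Dict.contains_eq_isSome_get?, h0]; rfl
        have hc3 : inner.contains (PySem.List.pyGetD e 3 "") = true := by
          rw [PySem.Dict.contains_eq_isSome_get?, h3]; rfl
        set V := inner.insert (PySem.List.pyGetD e 3 "") (lst ++ [e]) with hVdef
        have hstep_nodup : (D.insert (PySem.List.pyGetD e 0 "") V).keys.Nodup :=
          PySem.Dict.nodup_keys_insert _ _ _ hD
        have hstep_vals : ∀ v ∈ (D.insert (PySem.List.pyGetD e 0 "") V).values, v.keys.Nodup := by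
          intro v hv
          rcases PySem.Dict.mem_values_insert _ _ _ _ hv with h | h
          · rw [h, hVdef]; exact PySem.Dict.nodup_keys_insert _ _ _ hinner_nodup
          · exact hV v h
        rw [ih _ hstep_nodup hstep_vals]
        unfold outerExt
        apply PySem.Dict.ext
        dsimp only
        rw [PySem.Dict.items_insert_of_contains _ _ hc0, List.map_map]
        apply List.map_congr_left
        intro p hp
        by_cases hps : p.1 = PySem.List.pyGetD e 0 ""
        · have hp2 : p.2 = inner := by
            have := PySem.Dict.get?_of_mem_items D (show (p.1, p.2) ∈ D.items from hp) hD
            rw [hps, h0] at this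
            exact Option.some.inj this |>.symm
          simp only [Function.comp, hps, beq_self_eq_true, if_true]
          rw [hp2]
          -- goal: (e0, bucketExt l e0 V) = (p.1-mapped) (e0-key, bucketExt (e::l) e0 inner)
          refine congrArg (fun w => (PySem.List.pyGetD e 0 "", w)) ?_
          unfold bucketExt
          apply PySem.Dict.ext
          dsimp only
          rw [hVdef, PySem.Dict.items_insert_of_contains _ _ hc3, List.map_map]
          apply List.map_congr_left
          intro q hq
          by_cases hq3 : q.1 = PySem.List.pyGetD e 3 ""
          · have hq2 : q.2 = lst := by
              have := PySem.Dict.get?_of_mem_items inner (show (q.1, q.2) ∈ inner.items from hq) hinner_nodup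
              rw [hq3, h3] at this
              exact Option.some.inj this |>.symm
            have hpred : bPred (PySem.List.pyGetD e 0 "") (PySem.List.pyGetD e 3 "") e = true := by
              simp [bPred]
            simp only [Function.comp, hq3, beq_self_eq_true, if_true]
            rw [hq2]
            simp [hpred, List.append_assoc]
          · have hne : PySem.List.pyGetD e 3 "" ≠ q.1 := fun h => hq3 h.symm
            have hpred : bPred (PySem.List.pyGetD e 0 "") q.1 e = false := by
              simp [bPred, hne]
            have hb : (q.1 == PySem.List.pyGetD e 3 "") = false := beq_eq_false_iff_ne.mpr hq3
            simp only [Function.comp, hb, Bool.false_eq_true, if_false]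
            simp [hpred]
        · have hb : (p.1 == PySem.List.pyGetD e 0 "") = false := beq_eq_false_iff_ne.mpr hps
          have hne : PySem.List.pyGetD e 0 "" ≠ p.1 := fun h => hps h.symm
          simp only [Function.comp, hb, Bool.false_eq_true, if_false]
          rw [bucketExt_cons_of_ne e l p.1 p.2 hne]

theorem make_gene_dict_eq_alt (spp_list gene_names : List String) (gois : List (List String)) :
    make_gene_dict spp_list gene_names gois = make_gene_dict_alt spp_list gene_names gois := by
  classical
  set c0 : PySem.Dict String (List (List String)) :=
    gene_names.foldl (fun d2 j => d2.insert j ([] : List (List String))) PySem.Dict.empty with hc0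
  set D0 : PySem.Dict String (PySem.Dict String (List (List String))) :=
    spp_list.foldl (fun d i => d.insert i c0) PySem.Dict.empty with hD0
  have hD0nodup : D0.keys.Nodup :=
    PySem.Dict.nodup_keys_foldl_insert spp_list (fun _ _ => c0) _ PySem.Dict.nodup_keys_empty
  have hc0nodup : c0.keys.Nodup :=
    PySem.Dict.nodup_keys_foldl_insert gene_names (fun _ _ => ([] : List (List String))) _ PySem.Dict.nodup_keys_empty
  have hD0vals : ∀ v ∈ D0.values, v = c0 := by
    intro v hv
    rcases values_foldl_insert_const c0 spp_list PySem.Dict.empty v hv with h | h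
    · simp [PySem.Dict.values, PySem.Dict.empty] at h
    · exact h
  have hc0vals : ∀ v ∈ c0.values, v = ([] : List (List String)) := by
    intro v hv
    rcases values_foldl_insert_const ([] : List (List String)) gene_names PySem.Dict.empty v hv with h | h
    · simp [PySem.Dict.values, PySem.Dict.empty] at h
    · exact h
  have hmain := foldl_mgdStep_eq gois D0 hD0nodup (by
    intro v hv; rw [hD0vals v hv]; exact hc0nodup)
  -- B's inner dict, per species key
  have hinner : ∀ s : String,
      (gene_names.foldl (fun d2 g => d2.insert g (gois.filter (bPred s g))) PySem.Dict.empty).items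
        = c0.items.map (fun q => (q.1, gois.filter (bPred s q.1))) :=
    fun s => items_foldl_insert_map (fun g => gois.filter (bPred s g)) gene_names
      (fun _ => ([] : List (List String))) PySem.Dict.empty PySem.Dict.empty (by rfl)
  have houter :
      (spp_list.foldl
        (fun d s => d.insert s (gene_names.foldl (fun d2 g => d2.insert g (gois.filter (bPred s g))) PySem.Dict.empty))
        PySem.Dict.empty).items
      = D0.items.map (fun p => (p.1,
          gene_names.foldl (fun d2 g => d2.insert g (gois.filter (bPred p.1 g))) PySem.Dict.empty)) :=
    items_foldl_insert_map
      (fun s => gene_names.foldl (fun d2 g => d2.insert g (gois.filter (bPred s g))) PySem.Dict.empty)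
      spp_list (fun _ => c0) PySem.Dict.empty PySem.Dict.empty (by rfl)
  show ((gois.foldl mgdStep D0).items).map (fun p => (p.1, PySem.Dict.items p.2))
      = ((spp_list.foldl
          (fun d s => d.insert s (gene_names.foldl (fun d2 g => d2.insert g (gois.filter (bPred s g))) PySem.Dict.empty))
          PySem.Dict.empty).items).map (fun p => (p.1, PySem.Dict.items p.2))
  rw [hmain, houter]
  unfold outerExt
  simp only [List.map_map]
  apply List.map_congr_left
  intro p hp
  have hp2 : p.2 = c0 := hD0vals p.2 (by
    simp only [PySem.Dict.values]
    exact List.mem_map.mpr ⟨p, hp, rfl⟩)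
  simp only [Function.comp]
  refine congrArg (fun w => (p.1, w)) ?_
  rw [hinner p.1]
  unfold bucketExt
  dsimp only
  rw [hp2]
  apply List.map_congr_left
  intro q hq
  have hq2 : q.2 = ([] : List (List String)) := hc0vals q.2 (by
    simp only [PySem.Dict.values]
    exact List.mem_map.mpr ⟨q, hq, rfl⟩)
  rw [hq2]
  simp

-- ===== VERDICT (by name: the statement is the Claim_ definition above) =====
theorem make_gene_dict_spec : Claim_equal_make_gene_dict := by
  intro spp_list gene_names gois _ _
  unfold Spec_make_gene_dict
  exact make_gene_dict_eq_alt spp_list gene_names gois
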